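-- pv_equiv track=rewrite | github.com/chapel-lang/chapel | tools/chpl-language-server/src/lsp_util.py | encode_deltas
-- ===== SOURCE A (Python) =====
-- from typing import (
--     Any,
--     Callable,
--     Dict,
--     Generic,
--     Iterable,
--     List,
--     Optional,
--     Set,
--     Tuple,
--     Type,
--     TypeVar,
--     Union,
-- )
--
-- def encode_deltas(
--     tokens: List[Tuple[int, int, int]], token_type: int, token_modifiers: int
-- ) -> List[int]:
--     """
--     Given a (non-encoded) list of token positions, applies the LSP delta-encoding
--     to it: each line is encoded as a delta from the previous line, and each
--     column is encoded as a delta from the previous column.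
--
--     `tokens` must be sorted by line number, and then by column number within
--
--     Returns tokens with type token_type, and modifiers token_modifiers.
--     """
--
--     encoded = []
--     last_line = None
--     last_col = 0
--     for line, start, length in tokens:
--         backup = line
--         if line == last_line:
--             start -= last_col
--         if last_line is not None:
--             line -= last_line
--         last_line = backup
--
--         encoded.extend([line, start, length, token_type, token_modifiers])
--     return encoded
-- ===== SOURCE B (Python) =====
-- def encode_deltas(tokens, token_type, token_modifiers):
--     # Pass 1: precompute the line-delta table (first line absolute, then successive differences).
--     lines = [t[0] for t in tokens]
--     deltas = ([lines[0]] + [b - a for a, b in zip(lines, lines[1:])]) if lines else []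
--     # Pass 2: assemble output by zipping the delta table back with the tokens.
--     # Columns are emitted unchanged: A's last_col stays 0 forever, so it never delta-encodes columns.
--     out = []
--     for d, (_, start, length) in zip(deltas, tokens):
--         out.extend([d, start, length, token_type, token_modifiers])
--     return out
-- ===== Notes on version B (the rewrite author's own statement) =====
-- stated objective: alternative
-- what changed: Replaces the single stateful loop carrying last_line/last_col with a two-pass decomposition: a precomputed line-delta table (first line absolute, then pairwise differences) zipped back with the tokens for assembly; the dead last_col state is dropped entirely.
import Mathlib
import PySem

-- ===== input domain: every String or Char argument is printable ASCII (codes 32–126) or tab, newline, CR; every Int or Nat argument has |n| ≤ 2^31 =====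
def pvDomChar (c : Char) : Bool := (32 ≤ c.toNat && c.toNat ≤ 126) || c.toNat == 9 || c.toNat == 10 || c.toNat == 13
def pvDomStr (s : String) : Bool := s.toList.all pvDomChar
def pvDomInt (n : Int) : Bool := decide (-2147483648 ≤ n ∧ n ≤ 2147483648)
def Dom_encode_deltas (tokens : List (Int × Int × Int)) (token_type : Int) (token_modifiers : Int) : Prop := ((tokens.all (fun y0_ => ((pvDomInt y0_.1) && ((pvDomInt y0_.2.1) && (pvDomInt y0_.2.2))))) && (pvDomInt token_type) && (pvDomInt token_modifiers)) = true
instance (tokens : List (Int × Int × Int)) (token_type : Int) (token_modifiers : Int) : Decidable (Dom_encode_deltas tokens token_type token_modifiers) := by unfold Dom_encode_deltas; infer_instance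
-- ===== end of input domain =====

-- B replaces A's single stateful loop (last_line/last_col) by a precomputed line-delta table
-- zipped back with the tokens (objective: alternative decomposition; A's last_col is dead state).

-- ===== PORT A =====
-- state = (encoded, last_line, last_col), exactly A's loop variables
def encode_deltas (tokens : List (Int × Int × Int)) (token_type : Int) (token_modifiers : Int) : List Int :=
  (tokens.foldl
    (fun (st : List Int × Option Int × Int) tok =>
      let encoded := st.1
      let last_line := st.2.1
      let last_col := st.2.2
      let line := tok.1
      let start := tok.2.1
      let length := tok.2.2
      let backup := line
      let start := if some line = last_line then start - last_col else start
      let line := match last_line with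
        | some ll => line - ll
        | none => line
      (encoded ++ [line, start, length, token_type, token_modifiers], some backup, last_col))
    ([], none, 0)).1

-- ===== PORT B =====
-- deltas = [lines[0]] + [b - a for a, b in zip(lines, lines[1:])] (empty stays empty)
def pvDeltaTable (lines : List Int) : List Int :=
  match lines with
  | [] => []
  | l :: _ => l :: ((lines.zip lines.tail).map (fun p => p.2 - p.1))

def encode_deltas_alt (tokens : List (Int × Int × Int)) (token_type : Int) (token_modifiers : Int) : List Int :=
  let lines := tokens.map (fun t => t.1)
  let deltas := pvDeltaTable lines
  (deltas.zip tokens).foldl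
    (fun out p => out ++ [p.1, p.2.2.1, p.2.2.2, token_type, token_modifiers]) []

-- ===== PRECONDITION & SPEC =====
def Spec_encode_deltas (tokens : List (Int × Int × Int)) (token_type : Int) (token_modifiers : Int) (out : List Int) : Prop := out = encode_deltas_alt tokens token_type token_modifiers
instance (tokens : List (Int × Int × Int)) (token_type : Int) (token_modifiers : Int) (out : List Int) : Decidable (Spec_encode_deltas tokens token_type token_modifiers out) := by unfold Spec_encode_deltas; infer_instance

-- ===== CLAIM (what is proved, stated in full; the proofs are below) =====
def Claim_equal_encode_deltas : Prop := ∀ (tokens : List (Int × Int × Int)) (token_type : Int) (token_modifiers : Int), Dom_encode_deltas tokens token_type token_modifiers → Spec_encode_deltas tokens token_type token_modifiers (encode_deltas tokens token_type token_modifiers)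

-- ===== LEMMAS AND PROOFS =====

-- common reference: the delta-encoding as a structural recursion on the token list, carrying the previous line
def pvRec (prev : Option Int) (tokens : List (Int × Int × Int)) (tt tm : Int) : List Int :=
  match tokens with
  | [] => []
  | (l, s, len) :: rest =>
    (match prev with | some p => l - p | none => l) :: s :: len :: tt :: tm :: pvRec (some l) rest tt tm

-- A's fold with last_col = 0 unwinds to pvRec (uses start - 0 = start, so columns are never changed)
theorem pvA_eq_rec (tokens : List (Int × Int × Int)) (tt tm : Int) (acc : List Int) (prev : Option Int) :
    (tokens.foldl
      (fun (st : List Int × Option Int × Int) tok =>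
        let encoded := st.1
        let last_line := st.2.1
        let last_col := st.2.2
        let line := tok.1
        let start := tok.2.1
        let length := tok.2.2
        let backup := line
        let start := if some line = last_line then start - last_col else start
        let line := match last_line with
          | some ll => line - ll
          | none => line
        (encoded ++ [line, start, length, tt, tm], some backup, last_col))
      (acc, prev, 0)).1 = acc ++ pvRec prev tokens tt tm := by
  induction tokens generalizing acc prev with
  | nil => simp [pvRec]
  | cons t rest ih =>
    obtain ⟨l, s, len⟩ := t
    simp only [List.foldl_cons]
    rw [ih]
    cases prev with
    | none => simp [pvRec]
    | some p =>
      by_cases h : l = p <;> simp [pvRec, h, sub_zero]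

-- B's zip of the delta-table tail with the remaining tokens unwinds to pvRec (some p)
theorem pvB_tail_eq_rec (p : Int) (rest : List (Int × Int × Int)) (tt tm : Int) :
    ((((p :: rest.map (fun t => t.1)).zip (rest.map (fun t => t.1))).map
        (fun q => q.2 - q.1)).zip rest).flatMap
      (fun q => [q.1, q.2.2.1, q.2.2.2, tt, tm]) = pvRec (some p) rest tt tm := by
  induction rest generalizing p with
  | nil => simp [pvRec]
  | cons t rest2 ih =>
    obtain ⟨l, s, len⟩ := t
    simp only [List.map_cons, List.zip_cons_cons, List.flatMap_cons, pvRec]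
    rw [ih l]
    rfl

theorem pvB_eq_rec (tokens : List (Int × Int × Int)) (tt tm : Int) :
    encode_deltas_alt tokens tt tm = pvRec none tokens tt tm := by
  unfold encode_deltas_alt
  rw [PySem.List.foldl_append_eq_flatMap]
  cases tokens with
  | nil => simp [pvDeltaTable, pvRec]
  | cons t rest =>
    obtain ⟨l, s, len⟩ := t
    simp only [List.map_cons, pvDeltaTable, List.tail_cons, List.zip_cons_cons,
      List.flatMap_cons, List.nil_append, pvRec]
    rw [pvB_tail_eq_rec l rest tt tm]
    rfl

-- ===== VERDICT (by name: the statement is the Claim_ definition above) =====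
theorem encode_deltas_spec : Claim_equal_encode_deltas := by
  intro tokens tt tm _
  unfold Spec_encode_deltas encode_deltas
  rw [pvA_eq_rec, pvB_eq_rec]
  simp
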